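-- pv_equiv track=rewrite | github.com/Loretz1/CDRec | src/utils/amazon_data_processor.py | _get_item_seqs
-- ===== SOURCE A (Python) =====
-- from collections import defaultdict
-- from typing import Optional, Dict, List, Tuple
--
-- def _get_item_seqs(reviews: List[Tuple]) -> Dict:
--     item_seqs = defaultdict(list)
--     for user, item, time in reviews:
--         item_seqs[user].append((item, time))
--
--     for user, item_time in item_seqs.items():
--         item_time.sort(key=lambda x: x[1])
--         item_seqs[user] = [item for item, _ in item_time]
--     return item_seqs
-- ===== SOURCE B (Python) =====
-- from collections import defaultdict
-- from typing import Dict, List, Tuple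
--
-- def _get_item_seqs(reviews: List[Tuple]) -> Dict:
--     # keys in first-appearance order, then one pass over the time-sorted list (stable sort)
--     item_seqs = defaultdict(list, {user: [] for user, _, _ in reviews})
--     for user, item, _ in sorted(reviews, key=lambda r: r[2]):
--         item_seqs[user].append(item)
--     return item_seqs
-- ===== Notes on version B (the rewrite author's own statement) =====
-- stated objective: alternative
-- what changed: B sorts the whole reviews list once by time with a stable sort and fills the per-user lists in a single pass over it (keys pre-registered in first-appearance order), instead of A's grouping pass followed by a separate sort of every user's list.
import Mathlib
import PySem

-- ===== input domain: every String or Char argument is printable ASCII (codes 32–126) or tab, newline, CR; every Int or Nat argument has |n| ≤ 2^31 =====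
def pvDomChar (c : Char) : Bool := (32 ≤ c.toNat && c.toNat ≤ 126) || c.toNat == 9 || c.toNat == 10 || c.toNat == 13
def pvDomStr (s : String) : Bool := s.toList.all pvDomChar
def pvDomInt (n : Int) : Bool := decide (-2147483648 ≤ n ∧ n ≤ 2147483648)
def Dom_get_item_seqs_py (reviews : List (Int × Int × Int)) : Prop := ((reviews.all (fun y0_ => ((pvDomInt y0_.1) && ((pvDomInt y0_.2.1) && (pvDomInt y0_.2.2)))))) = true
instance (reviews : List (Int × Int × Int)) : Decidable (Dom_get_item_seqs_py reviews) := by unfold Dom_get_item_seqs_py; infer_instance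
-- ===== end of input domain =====

-- B groups in ONE pass over the reviews sorted once by time (stable sort) instead of A's
-- per-user sorts — a different pass structure with the same return value (the dict as an
-- association list in key first-appearance order).

-- ===== PORT A =====
-- A: group (item, time) pairs per user in appearance order, then sort each user's list by
-- time and keep the items. The second Python loop rewrites each value of the same dict while
-- iterating items(); ported as a fold over the grouped items rebuilding the dict key by key
-- (same keys in the same order, each with its rewritten value).
def get_item_seqs_py (reviews : List (Int × Int × Int)) : List (Int × List Int) :=
  let d : PySem.Dict Int (List (Int × Int)) :=
    reviews.foldl (fun d r => d.modify r.1 [] (fun l => l ++ [(r.2.1, r.2.2)])) PySem.Dict.empty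
  (d.items.foldl
      (fun out p => out.insert p.1 ((PySem.List.sorted p.2 (fun x => x.2)).map (fun x => x.1)))
      (PySem.Dict.empty : PySem.Dict Int (List Int))).items

-- ===== PORT B =====
def get_item_seqs_py_alt (reviews : List (Int × Int × Int)) : List (Int × List Int) :=
  let d0 : PySem.Dict Int (List Int) :=
    reviews.foldl (fun d r => d.insert r.1 []) PySem.Dict.empty
  ((PySem.List.sorted reviews (fun r => r.2.2)).foldl
      (fun d r => d.modify r.1 [] (fun l => l ++ [r.2.1])) d0).items


-- ===== PRECONDITION & SPEC =====
def Spec_get_item_seqs_py (reviews : List (Int × Int × Int)) (out : List (Int × List Int)) : Prop := out = get_item_seqs_py_alt reviews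
instance (reviews : List (Int × Int × Int)) (out : List (Int × List Int)) : Decidable (Spec_get_item_seqs_py reviews out) := by unfold Spec_get_item_seqs_py; infer_instance

-- ===== CLAIM (what is proved, stated in full; the proofs are below) =====
def Claim_equal_get_item_seqs_py : Prop := ∀ (reviews : List (Int × Int × Int)), Dom_get_item_seqs_py reviews → Spec_get_item_seqs_py reviews (get_item_seqs_py reviews)

-- ===== LEMMAS AND PROOFS =====

theorem filter_insertBy {α κ : Type} [LinearOrder κ] (key : α → κ) (p : α → Bool) (x : α) :
    ∀ acc : List α, acc.Pairwise (fun a b => key a ≤ key b) →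
      (PySem.List.insertBy (fun a b => decide (key a < key b)) x acc).filter p =
        if p x then PySem.List.insertBy (fun a b => decide (key a < key b)) x (acc.filter p)
        else acc.filter p := by
  intro acc
  induction acc with
  | nil =>
    intro _
    by_cases hpx : p x = true <;> simp [PySem.List.insertBy, List.filter, hpx]
  | cons y ys ih =>
    intro hp
    rw [List.pairwise_cons] at hp
    obtain ⟨hy, hys⟩ := hp
    rw [PySem.List.insertBy.eq_2]
    by_cases hxy : key x < key y
    · simp only [hxy, decide_true, if_true]
      by_cases hpx : p x = true
      · simp only [List.filter_cons, hpx, if_true]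
        by_cases hpy : p y = true
        · simp [hpy, PySem.List.insertBy.eq_2, hxy]
        · simp only [hpy, if_neg, Bool.false_eq_true, not_false_iff]
          -- goal: x :: filter p ys = insertBy _ x (filter p ys)
          cases hfl : (ys.filter p) with
          | nil => simp [PySem.List.insertBy]
          | cons z t =>
            have hz : z ∈ ys := by
              have : z ∈ ys.filter p := by rw [hfl]; exact List.mem_cons_self
              exact List.mem_of_mem_filter this
            have : key x < key z := lt_of_lt_of_le hxy (hy z hz)
            simp [PySem.List.insertBy.eq_2, this]
      · simp [List.filter_cons, hpx]
    · simp only [hxy, decide_false, Bool.false_eq_true, if_neg, not_false_iff]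
      by_cases hpy : p y = true
      · simp only [List.filter_cons, hpy, if_true]
        rw [ih hys]
        by_cases hpx : p x = true
        · simp [hpx, PySem.List.insertBy.eq_2, hxy]
        · simp [hpx]
      · simp only [List.filter_cons, hpy]
        rw [ih hys]
        simp

theorem filter_foldl_insertBy {α κ : Type} [LinearOrder κ] (key : α → κ) (p : α → Bool) :
    ∀ (l acc : List α), acc.Pairwise (fun a b => key a ≤ key b) →
      (l.foldl (fun acc x => PySem.List.insertBy (fun a b => decide (key a < key b)) x acc) acc).filter p =
        (l.filter p).foldl (fun acc x => PySem.List.insertBy (fun a b => decide (key a < key b)) x acc) (acc.filter p) := by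
  intro l
  induction l with
  | nil => intro acc _; simp
  | cons x l ih =>
    intro acc hp
    simp only [List.foldl_cons, List.filter_cons]
    rw [ih _ (PySem.List.insertBy_pairwise_le key x acc hp)]
    rw [filter_insertBy key p x acc hp]
    by_cases hpx : p x = true <;> simp [hpx]

theorem filter_sorted {α κ : Type} [LinearOrder κ] (key : α → κ) (p : α → Bool) (l : List α) :
    (PySem.List.sorted l key).filter p = PySem.List.sorted (l.filter p) key := by
  rw [PySem.List.sorted_eq_foldl_insertBy, PySem.List.sorted_eq_foldl_insertBy]
  simpa using filter_foldl_insertBy key p l [] (by simp)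

theorem map_insertBy {α β κ : Type} [LinearOrder κ] (g : α → β) (key : β → κ) (x : α) :
    ∀ acc : List α,
      (PySem.List.insertBy (fun a b => decide (key (g a) < key (g b))) x acc).map g =
        PySem.List.insertBy (fun a b => decide (key a < key b)) (g x) (acc.map g) := by
  intro acc
  induction acc with
  | nil => simp [PySem.List.insertBy]
  | cons y ys ih =>
    rw [PySem.List.insertBy.eq_2]
    by_cases h : key (g x) < key (g y)
    · simp [h, PySem.List.insertBy.eq_2]
    · simp [h, PySem.List.insertBy.eq_2, ih]

theorem sorted_map {α β κ : Type} [LinearOrder κ] (g : α → β) (key : β → κ) (l : List α) :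
    PySem.List.sorted (l.map g) key = (PySem.List.sorted l (fun a => key (g a))).map g := by
  rw [PySem.List.sorted_eq_foldl_insertBy, PySem.List.sorted_eq_foldl_insertBy, List.foldl_map]
  suffices h : ∀ acc : List α,
      (l.foldl (fun acc x => PySem.List.insertBy (fun a b => decide (key (g a) < key (g b))) x acc) acc).map g =
        l.foldl (fun acc x => PySem.List.insertBy (fun a b => decide (key a < key b)) (g x) acc) (acc.map g) by
    simpa using (h []).symm
  induction l with
  | nil => intro acc; simp
  | cons x l ih =>
    intro acc
    simp only [List.foldl_cons]
    rw [ih, map_insertBy]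

theorem getD_foldl_insert_nil (reviews : List (Int × Int × Int)) (u : Int) :
    ∀ d : PySem.Dict Int (List Int), d.getD u [] = [] →
      (reviews.foldl (fun d r => d.insert r.1 []) d).getD u [] = [] := by
  induction reviews with
  | nil => intro d h; simpa using h
  | cons r l ih =>
    intro d h
    simp only [List.foldl_cons]
    exact ih _ (by rw [PySem.Dict.getD_insert]; split <;> simp [h])

theorem set_update_of_mem {l : List Int} {s : PySem.Set Int} (h : ∀ x ∈ l, x ∈ s) :
    PySem.Set.update s l = s := by
  induction l generalizing s with
  | nil => rfl
  | cons x l ih =>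
    have hx : PySem.Set.add s x = s := by
      simp [PySem.Set.add, PySem.Set.contains, h x List.mem_cons_self]
    show PySem.Set.update (PySem.Set.add s x) l = s
    rw [hx]
    exact ih (fun y hy => h y (List.mem_cons_of_mem _ hy))

theorem main_eq (reviews : List (Int × Int × Int)) :
    get_item_seqs_py reviews = get_item_seqs_py_alt reviews := by
  unfold get_item_seqs_py get_item_seqs_py_alt
  set K : PySem.Set Int := PySem.Set.ofList (reviews.map (fun r => r.1)) with hK
  set dA : PySem.Dict Int (List (Int × Int)) :=
    reviews.foldl (fun d r => d.modify r.1 [] (fun l => l ++ [(r.2.1, r.2.2)])) PySem.Dict.empty with hdA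
  set d0 : PySem.Dict Int (List Int) :=
    reviews.foldl (fun d r => d.insert r.1 []) PySem.Dict.empty with hd0
  set srt : List (Int × Int × Int) := PySem.List.sorted reviews (fun r => r.2.2) with hsrt
  set dB : PySem.Dict Int (List Int) :=
    srt.foldl (fun d r => d.modify r.1 [] (fun l => l ++ [r.2.1])) d0 with hdB
  -- A-side keys
  have hAkeys : dA.keys = K := by
    rw [hdA, PySem.Dict.keys_foldl_modify_key reviews (fun r => r.1) []
      (fun _ r => fun l => l ++ [(r.2.1, r.2.2)]) PySem.Dict.empty]
    rw [PySem.Dict.keys_empty, hK]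
    rfl
  have hAnodup : dA.keys.Nodup := by
    rw [hdA]
    exact PySem.Dict.nodup_keys_foldl_modify_key reviews (fun r => r.1) []
      (fun _ r => fun l => l ++ [(r.2.1, r.2.2)]) PySem.Dict.empty (by simp [PySem.Dict.keys_empty])
  -- A-side: the second loop appends fresh distinct keys
  have hA2 : (dA.items.foldl
      (fun out p => out.insert p.1 ((PySem.List.sorted p.2 (fun x => x.2)).map (fun x => x.1)))
      (PySem.Dict.empty : PySem.Dict Int (List Int))).items
      = dA.items.map (fun p => (p.1, (PySem.List.sorted p.2 (fun x => x.2)).map (fun x => x.1))) := by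
    rw [PySem.Dict.items_foldl_insert_fresh dA.items (fun p => p.1)
      (fun p => (PySem.List.sorted p.2 (fun x => x.2)).map (fun x => x.1)) PySem.Dict.empty
      (by intro a _; simp [PySem.Dict.contains_empty]) hAnodup]
    rfl
  -- A-side per-key value
  have hAval : ∀ u : Int, dA.getD u [] =
      (reviews.filter (fun r => r.1 == u)).map (fun r => (r.2.1, r.2.2)) := by
    intro u
    have hfold : dA = (reviews.map (fun r => (r.1, (r.2.1, r.2.2)))).foldl
        (fun d p => d.modify p.1 [] (fun l => l ++ [p.2])) PySem.Dict.empty := by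
      rw [hdA, List.foldl_map]
    rw [hfold, PySem.Dict.getD_foldl_modify_append, List.filter_map]
    simp [Function.comp_def]
  -- B-side keys
  have hd0keys : d0.keys = K := by
    rw [hd0, PySem.Dict.keys_foldl_insert_key reviews (fun r => r.1) (fun _ _ => [])
      PySem.Dict.empty, PySem.Dict.keys_empty, hK]
    rfl
  have hd0nodup : d0.keys.Nodup := by
    rw [hd0]
    exact PySem.Dict.nodup_keys_foldl_insert_key reviews (fun r => r.1) (fun _ _ => [])
      PySem.Dict.empty (by simp [PySem.Dict.keys_empty])
  have hBkeys : dB.keys = K := by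
    rw [hdB, PySem.Dict.keys_foldl_modify_key srt (fun r => r.1) []
      (fun _ r => fun l => l ++ [r.2.1]) d0, hd0keys]
    apply set_update_of_mem
    intro x hx
    obtain ⟨r, hr, rfl⟩ := List.mem_map.mp hx
    rw [hsrt, PySem.List.mem_sorted] at hr
    rw [hK]
    exact (PySem.Set.mem_ofList _ _).mpr (List.mem_map_of_mem hr)
  have hBnodup : dB.keys.Nodup := by
    rw [hdB]
    exact PySem.Dict.nodup_keys_foldl_modify_key srt (fun r => r.1) []
      (fun _ r => fun l => l ++ [r.2.1]) d0 hd0nodup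
  -- B-side per-key value
  have hBval : ∀ u : Int, dB.getD u [] = (srt.filter (fun r => r.1 == u)).map (fun r => r.2.1) := by
    intro u
    have hfold : dB = (srt.map (fun r => (r.1, r.2.1))).foldl
        (fun d p => d.modify p.1 [] (fun l => l ++ [p.2])) d0 := by
      rw [hdB, List.foldl_map]
    rw [hfold, PySem.Dict.getD_foldl_modify_append, List.filter_map]
    rw [hd0, getD_foldl_insert_nil reviews u PySem.Dict.empty (by simp [PySem.Dict.getD_empty])]
    simp [Function.comp_def]
  -- assemble
  rw [hA2, PySem.Dict.items_eq_map_keys dA hAnodup [], PySem.Dict.items_eq_map_keys dB hBnodup [],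
    hAkeys, hBkeys, List.map_map]
  apply List.map_congr_left
  intro u _
  simp only [Function.comp]
  rw [hAval u, hBval u, hsrt, filter_sorted, sorted_map]
  simp [List.map_map, Function.comp_def]


-- ===== VERDICT (by name: the statement is the Claim_ definition above) =====
theorem get_item_seqs_py_spec : Claim_equal_get_item_seqs_py := by
  intro reviews _
  unfold Spec_get_item_seqs_py
  exact main_eq reviews
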